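-- pv_equiv track=rewrite | github.com/miftad456/A2SV_Solved_Questions | 3712-sum-of-elements-with-frequency-divisible-by-k/3712-sum-of-elements-with-frequency-divisible-by-k.py | sumDivisibleByK
-- ===== SOURCE A (Python) =====
-- from typing import List
--
-- def sumDivisibleByK(nums: List[int], k: int) -> int:
--     from collections import Counter
--     freq =  Counter(nums)
--     result =  0
--     for  i in freq:
--         if freq[i] % k ==0:
--             result +=  freq[i] * i
--     return result
-- ===== SOURCE B (Python) =====
-- def sumDivisibleByK(nums, k):
--     # sort-and-scan: detect runs of equal values in sorted order (nums not mutated)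
--     result = 0
--     cur = 0
--     run = 0
--     for x in sorted(nums):
--         if run > 0 and x == cur:
--             run += 1
--         else:
--             if run > 0 and run % k == 0:
--                 result += run * cur
--             cur = x
--             run = 1
--     if run > 0 and run % k == 0:
--         result += run * cur
--     return result
-- ===== Notes on version B (the rewrite author's own statement) =====
-- stated objective: alternative
-- what changed: Replaces the Counter frequency map and key loop by sorting the list once and scanning it for runs of equal values, adding run*value when the run length is divisible by k.
import Mathlib
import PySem

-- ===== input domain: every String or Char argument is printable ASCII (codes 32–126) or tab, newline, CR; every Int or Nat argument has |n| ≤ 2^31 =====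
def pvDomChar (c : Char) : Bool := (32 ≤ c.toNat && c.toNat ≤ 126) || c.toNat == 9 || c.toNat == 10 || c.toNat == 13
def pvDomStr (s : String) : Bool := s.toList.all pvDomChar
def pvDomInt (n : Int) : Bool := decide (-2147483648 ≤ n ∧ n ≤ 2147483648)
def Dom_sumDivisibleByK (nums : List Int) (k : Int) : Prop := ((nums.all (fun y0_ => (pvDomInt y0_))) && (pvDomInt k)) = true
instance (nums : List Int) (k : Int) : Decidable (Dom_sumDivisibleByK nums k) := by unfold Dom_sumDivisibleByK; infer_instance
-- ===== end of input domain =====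

-- B replaces A's Counter frequency map with a single scan over runs of equal values in sorted(nums); neither version mutates nums.

-- ===== PORT A =====
def sumDivisibleByK (nums : List Int) (k : Int) : Int :=
  let freq := PySem.Dict.counter nums
  freq.keys.foldl (fun result i =>
    if PySem.Int.mod (freq.getD i 0) k == 0 then result + freq.getD i 0 * i else result) 0

-- ===== PORT B =====
def pvWalkStep (k : Int) (st : Int × Int × Int) (x : Int) : Int × Int × Int :=
  if st.2.1 > 0 && x == st.1 then (st.1, st.2.1 + 1, st.2.2)
  else (x, 1, st.2.2 + (if st.2.1 > 0 && PySem.Int.mod st.2.1 k == 0 then st.2.1 * st.1 else 0))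

def sumDivisibleByK_alt (nums : List Int) (k : Int) : Int :=
  let st := (PySem.List.sorted nums (fun x => x) false).foldl (pvWalkStep k) (0, 0, 0)
  st.2.2 + (if st.2.1 > 0 && PySem.Int.mod st.2.1 k == 0 then st.2.1 * st.1 else 0)

-- ===== PRECONDITION & SPEC =====
-- Python A raises ZeroDivisionError when k = 0 and nums is nonempty (B does too); Pre_ excludes exactly those inputs.
def Pre_sumDivisibleByK (nums : List Int) (k : Int) : Prop := k ≠ 0 ∨ nums = []
instance (nums : List Int) (k : Int) : Decidable (Pre_sumDivisibleByK nums k) := by unfold Pre_sumDivisibleByK; infer_instance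
def pvWitness_sumDivisibleByK : List Int × Int := ([2, 2, 1, 2, 3, 3], 2)

def Spec_sumDivisibleByK (nums : List Int) (k : Int) (out : Int) : Prop := out = sumDivisibleByK_alt nums k
instance (nums : List Int) (k : Int) (out : Int) : Decidable (Spec_sumDivisibleByK nums k out) := by unfold Spec_sumDivisibleByK; infer_instance

-- ===== CLAIM (what is proved, stated in full; the proofs are below) =====
def Claim_equal_sumDivisibleByK : Prop := ∀ (nums : List Int) (k : Int), Dom_sumDivisibleByK nums k → Pre_sumDivisibleByK nums k → Spec_sumDivisibleByK nums k (sumDivisibleByK nums k)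

-- ===== LEMMAS AND PROOFS =====

-- the contribution of one value v occurring c times
def pvFlush (k c v : Int) : Int := if PySem.Int.mod c k == 0 then c * v else 0

-- canonical result: sum over the distinct values of s of the flush of their counts
def pvS (k : Int) (s : List Int) : Int := ∑ v ∈ s.toFinset, pvFlush k (s.count v) v

-- the epilogue of B's scan
def pvFinish (k : Int) (st : Int × Int × Int) : Int :=
  st.2.2 + (if st.2.1 > 0 && PySem.Int.mod st.2.1 k == 0 then st.2.1 * st.1 else 0)

theorem pvFinish_flush (k cur run res : Int) (h : 1 ≤ run) :
    pvFinish k (cur, run, res) = res + pvFlush k run cur := by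
  simp only [pvFinish, pvFlush]
  have : decide (run > 0) = true := by simpa using h
  simp [this]

theorem pvFlush_congr (k v : Int) {c c' : Int} (h : c = c') : pvFlush k c v = pvFlush k c' v := by
  rw [h]

-- folding "if cond then add" over a list is the sum of the pointwise contributions
theorem foldl_if_sum (c : Int → Bool) (g : Int → Int) :
    ∀ (l : List Int) (r : Int),
      l.foldl (fun r i => if c i then r + g i else r) r
        = r + (l.map (fun i => if c i then g i else 0)).sum := by
  intro l
  induction l with
  | nil => simp
  | cons x xs ih =>
    intro r
    simp only [List.foldl_cons, List.map_cons, List.sum_cons, ih]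
    by_cases h : c x = true
    · simp [h]; ring
    · simp [h]

-- A computes the canonical sum
theorem a_eq_pvS (nums : List Int) (k : Int) :
    sumDivisibleByK nums k = pvS k nums := by
  unfold sumDivisibleByK pvS
  simp only [PySem.Dict.keys_counter, PySem.Dict.getD_counter]
  rw [foldl_if_sum (fun i => PySem.Int.mod (nums.count i : Int) k == 0)
        (fun i => (nums.count i : Int) * i)]
  rw [← List.sum_toFinset _ (PySem.Set.nodup_ofList nums)]
  have hfs : (PySem.Set.ofList nums).toFinset = nums.toFinset := by
    ext v
    simp [List.mem_toFinset, PySem.Set.mem_ofList]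
  rw [hfs]
  simp [pvFlush]

-- splitting the canonical sum at one value
theorem pvS_cons (k y : Int) (ys : List Int) :
    pvS k (y :: ys) = pvFlush k ((y :: ys).count y) y + pvS k (ys.filter (· != y)) := by
  unfold pvS
  have hy : y ∈ (y :: ys).toFinset := by simp
  rw [← Finset.add_sum_erase _ _ hy]
  congr 1
  have hset : ((y :: ys).toFinset.erase y) = (ys.filter (· != y)).toFinset := by
    ext v
    simp only [Finset.mem_erase, List.mem_toFinset, List.mem_cons, List.mem_filter, bne_iff_ne]
    constructor
    · rintro ⟨hne, h | h⟩
      · exact absurd h hne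
      · exact ⟨h, hne⟩
    · rintro ⟨hv, hne⟩; exact ⟨hne, Or.inr hv⟩
  rw [hset]
  apply Finset.sum_congr rfl
  intro v hv
  have hvne : v ≠ y := by
    have := (List.mem_filter.mp (List.mem_toFinset.mp hv)).2
    simpa using this
  have hc : (y :: ys).count v = (ys.filter (· != y)).count v := by
    rw [List.count_cons, List.count_filter (by simpa using hvne)]
    simp [show (y == v) = false from by simp [Ne.symm hvne]]
  rw [hc]

-- the run scan on a ≤-sorted tail, with a live run of cur = x of length r
theorem walk_run (k : Int) :
    ∀ (xs : List Int) (x r res : Int),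
      (x :: xs).Pairwise (· ≤ ·) → 1 ≤ r →
      pvFinish k (xs.foldl (pvWalkStep k) (x, r, res))
        = res + pvFlush k (r + (xs.count x : Int)) x + pvS k (xs.filter (· != x)) := by
  intro xs
  induction xs with
  | nil =>
    intro x r res _ hr
    simp only [List.foldl_nil, List.count_nil, List.filter_nil]
    rw [pvFinish_flush k x r res hr]
    simp [pvS]
  | cons y ys ih =>
    intro x r res hpw hr
    have hxy : x ≤ y := (List.pairwise_cons.mp hpw).1 y (by simp)
    have hpw' : (y :: ys).Pairwise (· ≤ ·) := (List.pairwise_cons.mp hpw).2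
    by_cases hyx : y = x
    · -- the run continues
      subst hyx
      have hstep : pvWalkStep k (y, r, res) y = (y, r + 1, res) := by
        have : decide (r > 0) = true := by simpa using hr
        simp [pvWalkStep, this]
      have hpw2 : (y :: ys).Pairwise (· ≤ ·) := hpw'
      rw [List.foldl_cons, hstep, ih y (r + 1) res hpw2 (by omega)]
      have hcnt : ((y :: ys).count y : Int) + r = (ys.count y : Int) + (r + 1) := by
        rw [List.count_cons]; simp; omega
      have : pvFlush k (r + ((y :: ys).count y : Int)) y
           = pvFlush k (r + 1 + (ys.count y : Int)) y := by
        apply pvFlush_congr; omega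
      rw [this]
      congr 1
      simp
    · -- the run of x ends here; y starts a new run
      have hxlt : x < y := lt_of_le_of_ne hxy (fun h => hyx h.symm)
      have hall : ∀ z ∈ y :: ys, z ≠ x := by
        intro z hz
        rcases List.mem_cons.mp hz with h | h
        · subst h; exact hyx
        · have : y ≤ z := (List.pairwise_cons.mp hpw').1 z h
          omega
      have hstep : pvWalkStep k (x, r, res) y
          = (y, 1, res + pvFlush k r x) := by
        have hb : (y == x) = false := by simp [hyx]
        have hr' : decide (r > 0) = true := by simpa using hr
        simp [pvWalkStep, hb, hr', pvFlush]
      rw [List.foldl_cons, hstep, ih y 1 (res + pvFlush k r x) hpw' le_rfl]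
      have hc0 : (y :: ys).count x = 0 := by
        rw [List.count_eq_zero]
        intro h; exact hall x h rfl
      have hfe : (y :: ys).filter (· != x) = y :: ys :=
        List.filter_eq_self.mpr (fun z hz => by simpa using hall z hz)
      rw [hc0, hfe]
      have hSy : pvS k (y :: ys)
          = pvFlush k ((y :: ys).count y) y + pvS k (ys.filter (· != y)) := pvS_cons k y ys
      have hcy : ((y :: ys).count y : Int) = 1 + (ys.count y : Int) := by
        rw [List.count_cons]; simp; omega
      rw [hSy]
      have : pvFlush k ((y :: ys).count y : Int) y = pvFlush k (1 + (ys.count y : Int)) y := by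
        apply pvFlush_congr; omega
      rw [this]
      simp only [Nat.cast_zero, add_zero]
      ring

-- B computes the canonical sum of the sorted list
theorem b_eq_pvS (nums : List Int) (k : Int) :
    sumDivisibleByK_alt nums k = pvS k (PySem.List.sorted nums (fun x => x) false) := by
  unfold sumDivisibleByK_alt
  have hpw : (PySem.List.sorted nums (fun x => x) false).Pairwise (· ≤ ·) := by
    have := PySem.List.sorted_pairwise nums (fun x => x)
    simpa using this
  cases hs : PySem.List.sorted nums (fun x => x) false with
  | nil => simp [pvS]
  | cons x xs =>
    rw [hs] at hpw
    have hstep : pvWalkStep k (0, 0, 0) x = (x, 1, 0) := by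
      simp [pvWalkStep]
    have := walk_run k xs x 1 0 hpw le_rfl
    simp only [List.foldl_cons, hstep]
    show pvFinish k (xs.foldl (pvWalkStep k) (x, 1, 0)) = pvS k (x :: xs)
    rw [this, pvS_cons k x xs]
    have hcx : ((x :: xs).count x : Int) = 1 + (xs.count x : Int) := by
      rw [List.count_cons]; simp; omega
    have : pvFlush k ((x :: xs).count x : Int) x = pvFlush k (1 + (xs.count x : Int)) x := by
      apply pvFlush_congr; omega
    rw [this]
    ring

-- the canonical sum is invariant under permutation of the list
theorem pvS_sorted (nums : List Int) (k : Int) :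
    pvS k (PySem.List.sorted nums (fun x => x) false) = pvS k nums := by
  unfold pvS
  have hp : (PySem.List.sorted nums (fun x => x) false).Perm nums :=
    PySem.List.sorted_perm nums (fun x => x) false
  rw [List.toFinset_eq_of_perm _ _ hp]
  apply Finset.sum_congr rfl
  intro v _
  rw [hp.count_eq]

-- ===== VERDICT (by name: the statement is the Claim_ definition above) =====
theorem sumDivisibleByK_spec : Claim_equal_sumDivisibleByK := by
  intro nums k _ _
  unfold Spec_sumDivisibleByK
  rw [a_eq_pvS, b_eq_pvS, pvS_sorted]
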